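-- pv_equiv track=rewrite | github.com/Antire-AS/Decelerates | scripts/check_dead_client_fns.py | _path_param_match
-- ===== SOURCE A (Python) =====
-- def _path_param_match(client: str, backend_paths: set[str]) -> bool:
--     """Return True if client path matches a backend path with the same shape.
--
--     FastAPI uses {orgnr}; the frontend may interpolate any variable name. So we
--     compare path components allowing any single {placeholder} segment to match
--     any other {placeholder}.
--     """
--     if client in backend_paths:
--         return True
--     client_parts = client.split("/")
--     for backend in backend_paths:
--         bparts = backend.split("/")
--         if len(bparts) != len(client_parts):
--             continue
--         if all(
--             (cp == bp) or (cp.startswith("{") and bp.startswith("{"))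
--             for cp, bp in zip(client_parts, bparts)
--         ):
--             return True
--     return False
-- ===== SOURCE B (Python) =====
-- def _path_param_match(client: str, backend_paths: set[str]) -> bool:
--     def norm(p):
--         return tuple("{}" if seg.startswith("{") else seg for seg in p.split("/"))
--     nb = {norm(b) for b in backend_paths}
--     return norm(client) in nb
-- ===== Notes on version B (the rewrite author's own statement) =====
-- stated objective: simpler
-- what changed: Replaces the explicit nested comparison loop (and the fast-path membership test) by normalizing each path's placeholder segments to a canonical '{}' token and doing a single set lookup of the normalized client path.
import Mathlib
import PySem

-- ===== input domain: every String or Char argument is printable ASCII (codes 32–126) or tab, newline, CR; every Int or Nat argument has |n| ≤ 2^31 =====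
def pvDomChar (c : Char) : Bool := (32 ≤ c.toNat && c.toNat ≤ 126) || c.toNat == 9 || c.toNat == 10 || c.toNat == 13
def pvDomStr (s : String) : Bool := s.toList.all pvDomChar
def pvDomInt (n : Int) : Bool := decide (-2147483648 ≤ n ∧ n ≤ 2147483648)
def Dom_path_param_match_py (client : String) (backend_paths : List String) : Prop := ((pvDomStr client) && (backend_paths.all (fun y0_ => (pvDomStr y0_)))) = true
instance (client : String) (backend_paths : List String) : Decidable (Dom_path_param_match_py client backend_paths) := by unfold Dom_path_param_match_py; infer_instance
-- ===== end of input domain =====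

-- B normalizes placeholder segments to a canonical "{}" token and does one set lookup of the
-- normalized client path, instead of A's membership fast-path plus explicit nested comparison loop (objective: simpler).

-- ===== PORT A =====
-- (cp == bp) or (cp.startswith("{") and bp.startswith("{"))   (segments kept as List Char)
def pvSegOk (cp bp : List Char) : Bool :=
  cp == bp || (PySem.Chars.startswith cp ['{'] && PySem.Chars.startswith bp ['{'])

-- the 'for backend in backend_paths' loop with its early 'return True'
def pvLoopA (client_parts : List (List Char)) : List String → Bool
  | [] => false
  | backend :: rest =>
    let bparts := PySem.Chars.splitOn backend.toList ['/']
    if bparts.length ≠ client_parts.length then pvLoopA client_parts rest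
    else if (client_parts.zip bparts).all (fun p => pvSegOk p.1 p.2) then true
    else pvLoopA client_parts rest

def path_param_match_py (client : String) (backend_paths : List String) : Bool :=
  if backend_paths.contains client then true
  else pvLoopA (PySem.Chars.splitOn client.toList ['/']) backend_paths

-- ===== PORT B =====
-- "{}" if seg.startswith("{") else seg
def pvNormSeg (seg : List Char) : List Char :=
  if PySem.Chars.startswith seg ['{'] then ['{', '}'] else seg

-- norm(p): split on "/" and canonicalize each placeholder segment
def pvNorm (p : String) : List (List Char) :=
  (PySem.Chars.splitOn p.toList ['/']).map pvNormSeg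

def path_param_match_py_alt (client : String) (backend_paths : List String) : Bool :=
  let nb : PySem.Set (List (List Char)) := PySem.Set.ofList (backend_paths.map pvNorm)
  PySem.Set.contains nb (pvNorm client)

-- ===== PRECONDITION & SPEC =====
def Spec_path_param_match_py (client : String) (backend_paths : List String) (out : Bool) : Prop := out = path_param_match_py_alt client backend_paths
instance (client : String) (backend_paths : List String) (out : Bool) : Decidable (Spec_path_param_match_py client backend_paths out) := by unfold Spec_path_param_match_py; infer_instance

-- ===== CLAIM (what is proved, stated in full; the proofs are below) =====
def Claim_equal_path_param_match_py : Prop := ∀ (client : String) (backend_paths : List String), Dom_path_param_match_py client backend_paths → Spec_path_param_match_py client backend_paths (path_param_match_py client backend_paths)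

-- ===== LEMMAS AND PROOFS =====

theorem pvSegOk_iff (cp bp : List Char) : pvSegOk cp bp = true ↔ pvNormSeg cp = pvNormSeg bp := by
  unfold pvSegOk pvNormSeg
  cases h1 : PySem.Chars.startswith cp ['{'] <;> cases h2 : PySem.Chars.startswith bp ['{'] <;>
    simp [beq_iff_eq]
  · constructor
    · rintro rfl; simp [h1] at h2
    · rintro rfl; exact absurd h1 (by decide)
  · constructor
    · rintro rfl; simp [h1] at h2
    · rintro rfl; exact absurd h2 (by decide)

theorem pvZipAll_iff (xs : List (List Char)) : ∀ (ys : List (List Char)),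
    (xs.map pvNormSeg = ys.map pvNormSeg) ↔
      (ys.length = xs.length ∧ (xs.zip ys).all (fun p => pvSegOk p.1 p.2) = true) := by
  induction xs with
  | nil => intro ys; cases ys <;> simp
  | cons x xs ih =>
    intro ys
    cases ys with
    | nil => simp
    | cons y ys =>
      simp only [List.map_cons, List.cons.injEq, List.length_cons, List.zip_cons_cons,
        List.all_cons, Bool.and_eq_true, ih ys, pvSegOk_iff]
      constructor
      · rintro ⟨h1, h2, h3⟩; exact ⟨by omega, h1, h3⟩
      · rintro ⟨h1, h2, h3⟩; exact ⟨h2, by omega, h3⟩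

theorem pvLoopA_iff (cp : List (List Char)) (l : List String) :
    pvLoopA cp l = true ↔ cp.map pvNormSeg ∈ l.map pvNorm := by
  induction l with
  | nil => simp [pvLoopA]
  | cons b rest ih =>
    simp only [pvLoopA, List.map_cons, List.mem_cons]
    split_ifs with h1 h2
    · have hne : cp.map pvNormSeg ≠ pvNorm b := by
        intro h
        apply h1
        have := congrArg List.length h
        simpa [pvNorm] using this.symm
      rw [ih]; simp [hne]
    · have heq : cp.map pvNormSeg = pvNorm b := by
        unfold pvNorm
        exact (pvZipAll_iff cp (PySem.Chars.splitOn b.toList ['/'])).mpr ⟨by omega, h2⟩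
      simp [heq]
    · have hne : cp.map pvNormSeg ≠ pvNorm b := by
        intro h
        exact h2 ((pvZipAll_iff cp (PySem.Chars.splitOn b.toList ['/'])).mp h).2
      rw [ih]; simp [hne]

theorem pvAlt_iff (client : String) (bps : List String) :
    path_param_match_py_alt client bps = true ↔ pvNorm client ∈ bps.map pvNorm := by
  unfold path_param_match_py_alt
  simp [PySem.Set.contains, PySem.Set.mem_ofList]

-- ===== VERDICT (by name: the statement is the Claim_ definition above) =====
theorem path_param_match_py_spec : Claim_equal_path_param_match_py := by
  intro client bps _
  unfold Spec_path_param_match_py path_param_match_py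
  split_ifs with h
  · symm
    rw [pvAlt_iff]
    exact List.mem_map_of_mem (by simpa using h)
  · cases hB : path_param_match_py_alt client bps
    · cases hA : pvLoopA (PySem.Chars.splitOn client.toList ['/']) bps
      · rfl
      · have := (pvAlt_iff client bps).mpr (by
          have := (pvLoopA_iff (PySem.Chars.splitOn client.toList ['/']) bps).mp hA
          simpa [pvNorm] using this)
        simp [hB] at this
    · exact (pvLoopA_iff _ _).mpr (by simpa [pvNorm] using (pvAlt_iff client bps).mp hB)
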